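-- pv_equiv track=rewrite | github.com/lucorus/DiscordChatBot | bot.py | max_count_figure
-- ===== SOURCE A (Python) =====
-- def max_count_figure(number):
--     number = str(number)
--     max_count = 1
--     for i in range(0, 10):
--         count_number = number.count(str(i))
--         if count_number > max_count:
--             max_count = count_number
--     return max_count
-- ===== SOURCE B (Python) =====
-- def max_count_figure(number):
--     n = abs(number)
--     counts = [0] * 10
--     while True:
--         counts[n % 10] += 1
--         n //= 10
--         if n == 0:
--             break
--     best = 1
--     for c in counts:
--         if c > best:
--             best = c
--     return best
-- ===== Notes on version B (the rewrite author's own statement) =====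
-- stated objective: alternative
-- what changed: B never builds or scans a string: it extracts decimal digits of abs(number) arithmetically with a divmod do-while loop into a count table and takes the table's maximum floored at one, replacing A's ten str.count scans over str(number).
import Mathlib
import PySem

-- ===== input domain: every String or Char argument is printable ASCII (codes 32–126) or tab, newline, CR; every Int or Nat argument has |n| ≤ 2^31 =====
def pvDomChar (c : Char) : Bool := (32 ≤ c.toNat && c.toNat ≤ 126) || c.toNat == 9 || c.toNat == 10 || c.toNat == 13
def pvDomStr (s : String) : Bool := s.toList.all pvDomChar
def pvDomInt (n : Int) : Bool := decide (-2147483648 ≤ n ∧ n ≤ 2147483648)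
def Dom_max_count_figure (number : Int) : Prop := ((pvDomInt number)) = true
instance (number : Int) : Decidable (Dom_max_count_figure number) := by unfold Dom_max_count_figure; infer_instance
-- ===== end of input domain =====

-- B extracts the decimal digits of abs(number) arithmetically with a divmod do-while loop
-- into a count table and takes the table's maximum floored at one, instead of A's ten
-- str.count scans over str(number) (objective: alternative — no string is built at all).

-- ===== PORT A =====
def max_count_figure (number : Int) : Int :=
  let s := PySem.Int.toStr number
  (PySem.List.pyRange 0 10 1).foldl
    (fun max_count i =>
      let count_number : Int := (PySem.Str.count s (PySem.Int.toStr i) : Int)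
      if count_number > max_count then count_number else max_count) 1

-- ===== PORT B =====
-- the 'while True: counts[n % 10] += 1; n //= 10; if n == 0: break' loop of Source B
-- (n = abs(number) is a nonnegative int, so Nat's % and / are exact here)
def digitCountLoop (n : Nat) (counts : List Int) : List Int :=
  let counts' := counts.set (n % 10) (counts[n % 10]! + 1)
  if n / 10 = 0 then counts' else digitCountLoop (n / 10) counts'
termination_by n
decreasing_by omega

def max_count_figure_alt (number : Int) : Int :=
  let counts := digitCountLoop number.natAbs (List.replicate 10 0)
  counts.foldl (fun best c => if c > best then c else best) 1

-- ===== PRECONDITION & SPEC =====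
def Spec_max_count_figure (number : Int) (out : Int) : Prop := out = max_count_figure_alt number
instance (number : Int) (out : Int) : Decidable (Spec_max_count_figure number out) := by unfold Spec_max_count_figure; infer_instance

-- ===== CLAIM (what is proved, stated in full; the proofs are below) =====
def Claim_equal_max_count_figure : Prop := ∀ (number : Int), Dom_max_count_figure number → Spec_max_count_figure number (max_count_figure number)

-- ===== LEMMAS AND PROOFS =====

-- the decimal digits of n, most significant first (specification device for both sides)
def digitList (n : Nat) : List Nat :=
  if n < 10 then [n] else digitList (n / 10) ++ [n % 10]
termination_by n
decreasing_by omega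

-- Python's s.count(sub) for a one-character sub counts the occurrences of that character.
theorem count_go_single (c : Char) (l : List Char) : ∀ (fuel acc : Nat), l.length ≤ fuel →
    PySem.Chars.count.go [c] fuel l acc = acc + l.count c := by
  induction l with
  | nil => intro fuel acc _; cases fuel <;> simp [PySem.Chars.count.go]
  | cons h t ih =>
    intro fuel acc hf
    cases fuel with
    | zero => simp at hf
    | succ m =>
      rw [PySem.Chars.count.go]
      by_cases hc : c = h
      · subst hc
        rw [if_pos (by simp [List.isPrefixOf])]
        have hdrop : List.drop [c].length (c :: t) = t := by simp
        rw [hdrop, ih m (acc + 1) (by simpa using Nat.le_of_succ_le_succ hf)]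
        simp
        omega
      · rw [if_neg (by simp [List.isPrefixOf, hc])]
        rw [ih m acc (by simpa using Nat.le_of_succ_le_succ hf)]
        simp [Ne.symm hc]

theorem count_single (l : List Char) (c : Char) :
    PySem.Chars.count l [c] = l.count c := by
  rw [PySem.Chars.count]
  simp [count_go_single c l l.length 0 le_rfl]

theorem digitList_ge {n : Nat} (h : ¬ n < 10) :
    digitList n = digitList (n / 10) ++ [n % 10] := by
  rw [digitList, if_neg h]

-- Nat.toDigitsCore emits exactly the digit characters of digitList.
theorem toDigitsCore_eq : ∀ (fuel n : Nat) (ds : List Char), n < fuel →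
    Nat.toDigitsCore 10 fuel n ds = (digitList n).map Nat.digitChar ++ ds := by
  intro fuel
  induction fuel with
  | zero => intro n ds h; omega
  | succ m ih =>
    intro n ds h
    rw [Nat.toDigitsCore]
    by_cases h10 : n < 10
    · rw [if_pos (by omega), digitList, if_pos h10]
      simp [Nat.mod_eq_of_lt h10]
    · rw [if_neg (by omega), ih (n / 10) _ (by omega), digitList_ge h10]
      simp

theorem toDigits_eq (n : Nat) : Nat.toDigits 10 n = (digitList n).map Nat.digitChar := by
  rw [Nat.toDigits, toDigitsCore_eq (n + 1) n [] (by omega)]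
  simp

-- Nat.digitChar is injective below 10.
theorem digitChar_inj : ∀ a < 10, ∀ b < 10, Nat.digitChar a = Nat.digitChar b → a = b := by decide

theorem digitList_lt (n : Nat) : ∀ x ∈ digitList n, x < 10 := by
  induction n using Nat.strong_induction_on with
  | _ n ih =>
    rw [digitList]
    by_cases h : n < 10
    · simp [h]
    · rw [if_neg h]
      intro x hx
      rcases List.mem_append.mp hx with hx | hx
      · exact ih (n / 10) (by omega) x hx
      · simp at hx; omega

theorem count_map_digitChar (d : Nat) (hd : d < 10) :
    ∀ (l : List Nat), (∀ x ∈ l, x < 10) →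
      (l.map Nat.digitChar).count (Nat.digitChar d) = l.count d := by
  intro l
  induction l with
  | nil => simp
  | cons x t ih =>
    intro hl
    have hx : x < 10 := hl x (List.mem_cons_self)
    simp only [List.map_cons, List.count_cons]
    rw [ih (fun y hy => hl y (List.mem_cons_of_mem _ hy))]
    by_cases he : x = d
    · simp [he]
    · have : Nat.digitChar x ≠ Nat.digitChar d := fun h => he (digitChar_inj x hx d hd h)
      simp [he, this]

-- A's per-digit string count equals the digit count of digitList |number|.
theorem countStr (number : Int) (d : Nat) (hd : d < 10) :
    (PySem.Int.toStr number).toList.count (Nat.digitChar d) =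
      (digitList number.natAbs).count d := by
  rw [PySem.Int.toList_toStr, PySem.Int.toChars]
  by_cases hneg : number < 0
  · rw [if_pos hneg, List.count_cons]
    have hne : (Nat.digitChar d ≠ '-') := by
      rcases (by omega : d = 0 ∨ d = 1 ∨ d = 2 ∨ d = 3 ∨ d = 4 ∨ d = 5 ∨ d = 6 ∨ d = 7 ∨ d = 8 ∨ d = 9) with rfl|rfl|rfl|rfl|rfl|rfl|rfl|rfl|rfl|rfl <;> decide
    rw [toDigits_eq, count_map_digitChar d hd _ (digitList_lt _)]
    simp [Ne.symm hne]
  · rw [if_neg hneg]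
    have : number.toNat = number.natAbs := by omega
    rw [this, toDigits_eq, count_map_digitChar d hd _ (digitList_lt _)]

-- One run of B's divmod loop adds, coordinate-wise, the digit counts of digitList n.
theorem loop_eq (n : Nat) : ∀ (a0 a1 a2 a3 a4 a5 a6 a7 a8 a9 : Int),
    digitCountLoop n [a0, a1, a2, a3, a4, a5, a6, a7, a8, a9] =
      [a0 + ((digitList n).count 0 : Int), a1 + ((digitList n).count 1 : Int),
       a2 + ((digitList n).count 2 : Int), a3 + ((digitList n).count 3 : Int),
       a4 + ((digitList n).count 4 : Int), a5 + ((digitList n).count 5 : Int),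
       a6 + ((digitList n).count 6 : Int), a7 + ((digitList n).count 7 : Int),
       a8 + ((digitList n).count 8 : Int), a9 + ((digitList n).count 9 : Int)] := by
  induction n using Nat.strong_induction_on with
  | _ n ih =>
    intro a0 a1 a2 a3 a4 a5 a6 a7 a8 a9
    rw [digitCountLoop]
    by_cases h : n < 10
    · rw [if_pos (by omega), digitList, if_pos h]
      interval_cases n <;> simp
    · rw [if_neg (by omega), digitList_ge h]
      have hm : n % 10 < 10 := Nat.mod_lt _ (by norm_num)
      have hih := fun b0 b1 b2 b3 b4 b5 b6 b7 b8 b9 =>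
        ih (n / 10) (by omega) b0 b1 b2 b3 b4 b5 b6 b7 b8 b9
      interval_cases hmv : (n % 10) <;>
        · simp only [List.getElem!_cons_zero, List.getElem!_cons_succ, List.set_cons_zero,
            List.set_cons_succ]
          rw [hih]
          simp [List.count_append]
          omega

-- ===== VERDICT (by name: the statement is the Claim_ definition above) =====
theorem max_count_figure_spec : Claim_equal_max_count_figure := by
  intro number _
  unfold Spec_max_count_figure max_count_figure max_count_figure_alt
  have hcnt : ∀ (i : Int) (d : Nat), d < 10 → (PySem.Int.toStr i).toList = [Nat.digitChar d] →
      PySem.Str.count (PySem.Int.toStr number) (PySem.Int.toStr i) =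
        (digitList number.natAbs).count d := by
    intro i d hd h
    rw [PySem.Str.count_eq, h, count_single, countStr number d hd]
  have hr : PySem.List.pyRange 0 10 1 = [0, 1, 2, 3, 4, 5, 6, 7, 8, 9] := by decide
  have hrep : (List.replicate 10 (0 : Int)) = [0, 0, 0, 0, 0, 0, 0, 0, 0, 0] := by decide
  simp only [hr, hrep, loop_eq, zero_add, List.foldl_cons, List.foldl_nil,
    hcnt 0 0 (by omega) (by decide), hcnt 1 1 (by omega) (by decide),
    hcnt 2 2 (by omega) (by decide), hcnt 3 3 (by omega) (by decide),
    hcnt 4 4 (by omega) (by decide), hcnt 5 5 (by omega) (by decide),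
    hcnt 6 6 (by omega) (by decide), hcnt 7 7 (by omega) (by decide),
    hcnt 8 8 (by omega) (by decide), hcnt 9 9 (by omega) (by decide)]
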